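-- pv_equiv track=rewrite | github.com/sufftea/aoc2024 | day15/part2.py | can_move_in_dir
-- ===== SOURCE A (Python) =====
-- def can_move_in_dir(map, robot_x, robot_y, dx, dy, visited=None):
--     if visited is None:
--         visited = set()
--     if (robot_x, robot_y) in visited:
--         return True
--     visited.add((robot_x, robot_y))
--
--     next_x, next_y = robot_x + dx, robot_y + dy
--     next = map[next_y][next_x]
--
--     heads = set()
--     if next == "[":
--         heads.add((next_x, next_y))
--         heads.add((next_x + 1, next_y))
--     elif next == "]":
--         heads.add((next_x, next_y))
--         heads.add((next_x - 1, next_y))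
--     elif next == "#":
--         return False
--
--     can_move = True
--     for head_x, head_y in heads:
--         next_can_move = can_move_in_dir(map, head_x, head_y, dx, dy, visited)
--         can_move = can_move and next_can_move
--     return can_move
-- ===== SOURCE B (Python) =====
-- def _succ(map, dx, dy, cell):
--     # Cells the box at map[cell+d] would drag along when pushed in direction (dx, dy).
--     nx, ny = cell[0] + dx, cell[1] + dy
--     tile = map[ny][nx]
--     if tile != "[" and tile != "]":
--         return []
--     side = 1 if tile == "[" else -1
--     return [(nx, ny), (nx + side, ny)]
--
--
-- def can_move_in_dir(map, robot_x, robot_y, dx, dy, visited=None):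
--     # Two phases instead of A's recursion: (1) flood-fill the set of dragged cells
--     # with an explicit stack, recording them in order; (2) scan the recorded cells
--     # for a wall in front of any of them.
--     if visited is None:
--         visited = set()
--     cells = []
--     stack = [(robot_x, robot_y)]
--     while stack:
--         cell = stack.pop()
--         if cell not in visited:
--             visited.add(cell)
--             cells.append(cell)
--             stack.extend(reversed(_succ(map, dx, dy, cell)))
--     return all(map[y + dy][x + dx] != "#" for x, y in cells)
-- ===== Notes on version B (the rewrite author's own statement) =====
-- stated objective: alternative
-- what changed: Replaces A's recursion (one call per cell with an early False on a wall and sibling results folded with 'and') by two separate phases: an iterative stack flood fill that only collects the dragged cells, then a scan of the collected cells for a wall in front of any of them.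
import Mathlib
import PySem

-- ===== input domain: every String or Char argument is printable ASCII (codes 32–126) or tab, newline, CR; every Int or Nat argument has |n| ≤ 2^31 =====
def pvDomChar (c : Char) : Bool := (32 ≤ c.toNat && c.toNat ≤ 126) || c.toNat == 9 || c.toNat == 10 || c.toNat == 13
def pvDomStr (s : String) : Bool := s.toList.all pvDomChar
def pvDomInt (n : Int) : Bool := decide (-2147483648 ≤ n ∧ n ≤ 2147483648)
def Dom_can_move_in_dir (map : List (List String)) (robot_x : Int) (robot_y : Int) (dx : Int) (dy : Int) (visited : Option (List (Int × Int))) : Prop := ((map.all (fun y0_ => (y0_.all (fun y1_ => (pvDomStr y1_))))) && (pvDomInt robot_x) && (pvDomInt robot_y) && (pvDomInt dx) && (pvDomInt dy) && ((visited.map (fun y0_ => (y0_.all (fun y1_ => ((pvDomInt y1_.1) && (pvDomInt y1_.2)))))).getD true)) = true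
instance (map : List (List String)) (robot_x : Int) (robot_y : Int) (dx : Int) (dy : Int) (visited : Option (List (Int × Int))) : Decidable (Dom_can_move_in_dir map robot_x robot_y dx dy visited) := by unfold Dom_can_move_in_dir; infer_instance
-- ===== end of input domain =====

-- B replaces A's recursive flood fill by two separate phases — an iterative stack flood fill that
-- only COLLECTS the dragged cells, then a scan of the collected cells for a wall in front — with
-- the same explored cell set; equivalence is about the RETURN value only (both Pythons also add
-- the explored cells to a caller-supplied `visited` set).

-- map[y][x] with Python's negative-index semantics (none = IndexError)
def pvRead (map : List (List String)) (x : Int) (y : Int) : Option String :=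
  (PySem.List.pyGet? map y).bind (fun row => PySem.List.pyGet? row x)

-- Totality guard for both ports, one unit per processed cell; it exists only because Lean demands
-- termination (Python recurses/loops freely). The equivalence proof below matches the two ports'
-- fuel consumption step for step, so it holds for this bound exactly as for any other.
def pvFuel (map : List (List String)) : Nat :=
  2 * ((2 * ((map.map List.length).foldr Nat.max 0) + 3) * (2 * map.length + 1) + 1) + 2

def pvInitVisited (visited : Option (List (Int × Int))) : PySem.Set (Int × Int) :=
  match visited with
  | none => PySem.Set.empty
  | some l => PySem.Set.ofList l

-- ===== PORT A =====
-- A's recursion with its sibling fold inlined as a pending-call list: `pvGoA (c :: cs)` is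
-- "can_move_in_dir at c, then the remaining sibling calls cs", threading (visited, fuel) and
-- AND-ing the results exactly as A's loop `can_move = can_move and next_can_move` does.
-- Where Python raises IndexError (out-of-range read, excluded by Pre_) the port records a
-- blocked cell; the `min … f` is definitionally the returned fuel (pvGoA_fuel_le below).
def pvGoA (map : List (List String)) (dx : Int) (dy : Int) :
    List (Int × Int) → PySem.Set (Int × Int) → Nat → PySem.Set (Int × Int) × Nat × Bool
  | _, v, 0 => (v, 0, true)
  | [], v, f => (v, f, true)
  | (x, y) :: cs, v, f + 1 =>
    if PySem.Set.contains v (x, y) then pvGoA map dx dy cs v f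
    else
      let v1 := PySem.Set.add v (x, y)
      let nx := x + dx
      let ny := y + dy
      let step : Bool × PySem.Set (Int × Int) :=
        match pvRead map nx ny with
        | none => (true, PySem.Set.empty)            -- Python: IndexError (outside Pre_)
        | some cell =>
          if cell = "[" then (false, PySem.Set.add (PySem.Set.add PySem.Set.empty (nx, ny)) (nx + 1, ny))
          else if cell = "]" then (false, PySem.Set.add (PySem.Set.add PySem.Set.empty (nx, ny)) (nx - 1, ny))
          else (decide (cell = "#"), PySem.Set.empty)
      let r1 := pvGoA map dx dy step.2 v1 f
      let r2 := pvGoA map dx dy cs r1.1 (min r1.2.1 f)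
      (r2.1, r2.2.1, (!step.1 && r1.2.2) && r2.2.2)
  termination_by _cs _v f => f
  decreasing_by
  · exact Nat.lt_succ_self _
  · exact Nat.lt_succ_self _
  · exact Nat.lt_succ_of_le (Nat.min_le_right _ _)

def can_move_in_dir (map : List (List String)) (robot_x : Int) (robot_y : Int) (dx : Int) (dy : Int) (visited : Option (List (Int × Int))) : Bool :=
  (pvGoA map dx dy [(robot_x, robot_y)] (pvInitVisited visited) (pvFuel map)).2.2

-- ===== PORT B =====
-- Source B's helper `_succ`: the cells the box in front of `c` would drag along.
def pvSucc (map : List (List String)) (dx : Int) (dy : Int) (c : Int × Int) : List (Int × Int) :=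
  match pvRead map (c.1 + dx) (c.2 + dy) with
  | none => []                         -- Python: IndexError (outside Pre_)
  | some tile =>
    if tile ≠ "[" ∧ tile ≠ "]" then []
    else
      let side : Int := if tile = "[" then 1 else -1
      [(c.1 + dx, c.2 + dy), (c.1 + dx + side, c.2 + dy)]

-- Phase 1: Source B's while loop (stack top = list head; `extend(reversed(...))` makes the first
-- successor the next pop), collecting the newly explored cells in order; one fuel unit per pop.
def pvFill (map : List (List String)) (dx : Int) (dy : Int) :
    List (Int × Int) → PySem.Set (Int × Int) → List (Int × Int) → Nat → List (Int × Int)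
  | _, _, cells, 0 => cells
  | [], _, cells, _ + 1 => cells
  | c :: st, v, cells, f + 1 =>
    if PySem.Set.contains v c = false then
      pvFill map dx dy (pvSucc map dx dy c ++ st) (PySem.Set.add v c) (cells ++ [c]) f
    else pvFill map dx dy st v cells f

-- Phase 2: `map[y + dy][x + dx] != "#"`; pvRead is none only on inputs outside Pre_ (Python:
-- IndexError), where phase 1 already read the same cell.
def pvPass (map : List (List String)) (dx : Int) (dy : Int) (c : Int × Int) : Bool :=
  (pvRead map (c.1 + dx) (c.2 + dy)).getD "#" ≠ "#"

def can_move_in_dir_alt (map : List (List String)) (robot_x : Int) (robot_y : Int) (dx : Int) (dy : Int) (visited : Option (List (Int × Int))) : Bool :=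
  (pvFill map dx dy [(robot_x, robot_y)] (pvInitVisited visited) [] (pvFuel map)).all (pvPass map dx dy)

-- ===== PRECONDITION & SPEC =====
def pvDragStep (map : List (List String)) (dx : Int) (dy : Int) (v0 : List (Int × Int)) (s : PySem.Set (Int × Int)) : PySem.Set (Int × Int) :=
  PySem.Set.update s ((s.filter (fun c => !(v0.contains c))).flatMap (pvSucc map dx dy))

-- Least fixed point of the monotone pvDragStep above {robot}: iteration stops as soon as the set
-- stops growing; the fuel bound (more than the number of distinct reachable cells) is never hit.
def pvClose (map : List (List String)) (dx : Int) (dy : Int) (v0 : List (Int × Int)) : Nat → PySem.Set (Int × Int) → PySem.Set (Int × Int)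
  | 0, s => s
  | fuel + 1, s =>
    let s' := pvDragStep map dx dy v0 s
    if s'.length = s.length then s else pvClose map dx dy v0 fuel s'

def pvDragged (map : List (List String)) (robot_x : Int) (robot_y : Int) (dx : Int) (dy : Int) (v0 : List (Int × Int)) : PySem.Set (Int × Int) :=
  pvClose map dx dy v0 ((2 * ((map.map List.length).foldr Nat.max 0) + 3) * (2 * map.length + 2) + 3) (PySem.Set.ofList [(robot_x, robot_y)])

-- Pre_ holds exactly when A returns normally: every cell the push drags along (starting from the
-- robot, stopping at cells already in `visited`) has its next cell in range; on the excluded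
-- inputs A raises IndexError (map[next_y][next_x] out of range).
def Pre_can_move_in_dir (map : List (List String)) (robot_x : Int) (robot_y : Int) (dx : Int) (dy : Int) (visited : Option (List (Int × Int))) : Prop :=
  ((pvDragged map robot_x robot_y dx dy (visited.getD [])).all
    (fun c => (visited.getD []).contains c || (pvRead map (c.1 + dx) (c.2 + dy)).isSome)) = true
instance (map : List (List String)) (robot_x : Int) (robot_y : Int) (dx : Int) (dy : Int) (visited : Option (List (Int × Int))) : Decidable (Pre_can_move_in_dir map robot_x robot_y dx dy visited) := by unfold Pre_can_move_in_dir; infer_instance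

def pvWitness_can_move_in_dir : List (List String) × Int × Int × Int × Int × (Option (List (Int × Int))) :=
  ([[".", "[", "]", "#"]], 0, 0, 1, 0, none)

def Spec_can_move_in_dir (map : List (List String)) (robot_x : Int) (robot_y : Int) (dx : Int) (dy : Int) (visited : Option (List (Int × Int))) (out : Bool) : Prop := out = can_move_in_dir_alt map robot_x robot_y dx dy visited
instance (map : List (List String)) (robot_x : Int) (robot_y : Int) (dx : Int) (dy : Int) (visited : Option (List (Int × Int))) (out : Bool) : Decidable (Spec_can_move_in_dir map robot_x robot_y dx dy visited out) := by unfold Spec_can_move_in_dir; infer_instance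

-- ===== CLAIM (what is proved, stated in full; the proofs are below) =====
def Claim_equal_can_move_in_dir : Prop := ∀ (map : List (List String)) (robot_x : Int) (robot_y : Int) (dx : Int) (dy : Int) (visited : Option (List (Int × Int))), Dom_can_move_in_dir map robot_x robot_y dx dy visited → Pre_can_move_in_dir map robot_x robot_y dx dy visited → Spec_can_move_in_dir map robot_x robot_y dx dy visited (can_move_in_dir map robot_x robot_y dx dy visited)

-- ===== LEMMAS AND PROOFS =====

theorem pvGoA_nil (map : List (List String)) (dx dy : Int) (v : PySem.Set (Int × Int)) :
    ∀ f, pvGoA map dx dy [] v f = (v, f, true) := by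
  intro f; cases f <;> simp [pvGoA]

theorem pvGoA_fuel_le (map : List (List String)) (dx dy : Int) :
    ∀ (f : Nat) (cs : List (Int × Int)) (v : PySem.Set (Int × Int)),
      (pvGoA map dx dy cs v f).2.1 ≤ f := by
  intro f
  induction f using Nat.strong_induction_on with
  | _ f ih =>
    intro cs v
    match f, cs with
    | 0, cs => simp [pvGoA]
    | f + 1, [] => simp [pvGoA]
    | f + 1, (x, y) :: cs =>
      rw [pvGoA]
      by_cases h : PySem.Set.contains v (x, y) = true
      · rw [if_pos h]
        exact le_trans (ih f (by omega) cs v) (by omega)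
      · rw [if_neg h]
        simp only []
        exact le_trans (ih _ (by omega) _ _) (le_trans (min_le_right _ _) (by omega))

-- The cells accumulator of pvFill only ever grows at the back.
theorem pvFill_acc (map : List (List String)) (dx dy : Int) :
    ∀ (f : Nat) (st : List (Int × Int)) (v : PySem.Set (Int × Int)) (cells : List (Int × Int)),
      pvFill map dx dy st v cells f = cells ++ pvFill map dx dy st v [] f := by
  intro f
  induction f with
  | zero => intro st v cells; simp [pvFill]
  | succ f ih =>
    intro st v cells
    match st with
    | [] => simp [pvFill]
    | c :: st =>
      rw [pvFill, pvFill]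
      by_cases h : PySem.Set.contains v c = false
      · rw [if_pos h, if_pos h, ih _ _ (cells ++ [c])]
        simp only [List.nil_append]
        rw [ih _ _ [c], List.append_assoc]
      · rw [if_neg h, if_neg h]; exact ih st v cells

-- The bisimulation: the wall scan over what phase 1 collects from a pending-call list cs₀ (on top
-- of any rest of the stack) equals A's flag on cs₀ AND-ed with the scan of the continuation run
-- from A's resulting visited set and fuel.
theorem pvFill_goA (map : List (List String)) (dx dy : Int) :
    ∀ (f : Nat) (cs rest : List (Int × Int)) (v : PySem.Set (Int × Int)),
      (pvFill map dx dy (cs ++ rest) v [] f).all (pvPass map dx dy) =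
        ((pvGoA map dx dy cs v f).2.2 &&
          (pvFill map dx dy rest (pvGoA map dx dy cs v f).1 [] (pvGoA map dx dy cs v f).2.1).all (pvPass map dx dy)) := by
  intro f
  induction f using Nat.strong_induction_on with
  | _ f ih =>
    intro cs rest v
    match f, cs with
    | 0, cs => simp [pvGoA, pvFill]
    | f + 1, [] => simp [pvGoA]
    | f + 1, (x, y) :: cs =>
      rw [pvGoA]
      by_cases h : PySem.Set.contains v (x, y) = true
      · rw [if_pos h]
        simp only [List.cons_append, pvFill]
        rw [if_neg (by rw [h]; simp : ¬ PySem.Set.contains v (x, y) = false)]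
        exact ih f (by omega) cs rest v
      · rw [if_neg h]
        simp only [List.cons_append, pvFill]
        rw [if_pos (Bool.eq_false_iff.mpr h)]
        simp only [List.nil_append]
        rw [pvFill_acc map dx dy f _ _ [(x, y)]]
        simp only [List.all_append, List.all_cons, List.all_nil, Bool.and_true]
        rcases hr : pvRead map (x + dx) (y + dy) with _ | cell
        · -- IndexError side (outside Pre_): no successors, blocked in both ports
          simp only [pvSucc, hr, PySem.Set.empty, List.nil_append]
          rw [ih f (by omega) cs rest (PySem.Set.add v (x, y))]
          simp [pvGoA_nil, pvPass, hr]
        · by_cases hc1 : cell = "["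
          · subst hc1
            have hset : PySem.Set.add (PySem.Set.add PySem.Set.empty ((x + dx : Int), (y + dy : Int))) (x + dx + 1, y + dy) = [(x + dx, y + dy), (x + dx + 1, y + dy)] := by
              simp [PySem.Set.add, PySem.Set.empty]
            simp only [pvSucc, hr]
            simp only [hset]
            simp only [if_neg (show ¬(("[":String) ≠ "[" ∧ ("[":String) ≠ "]") by decide),
                       ite_true]
            have h1 := ih f (by omega) [(x + dx, y + dy), (x + dx + 1, y + dy)] (cs ++ rest) (PySem.Set.add v (x, y))
            simp only [List.cons_append, List.nil_append] at h1 ⊢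
            rw [h1]
            have hle := pvGoA_fuel_le map dx dy f [(x + dx, y + dy), (x + dx + 1, y + dy)] (PySem.Set.add v (x, y))
            rw [min_eq_left hle]
            rw [ih _ (by omega) cs rest _]
            simp [pvPass, hr, Bool.and_assoc]
          · by_cases hc2 : cell = "]"
            · subst hc2
              have hset : PySem.Set.add (PySem.Set.add PySem.Set.empty ((x + dx : Int), (y + dy : Int))) (x + dx - 1, y + dy) = [(x + dx, y + dy), (x + dx - 1, y + dy)] := by
                simp [PySem.Set.add, PySem.Set.empty]
              simp only [pvSucc, hr]
              simp only [hset]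
              simp only [if_neg (show ¬(("]":String) ≠ "[" ∧ ("]":String) ≠ "]") by decide),
                         if_neg (show ¬("]":String) = "[" by decide), ite_true, ← sub_eq_add_neg]
              have h1 := ih f (by omega) [(x + dx, y + dy), (x + dx - 1, y + dy)] (cs ++ rest) (PySem.Set.add v (x, y))
              simp only [List.cons_append, List.nil_append] at h1 ⊢
              rw [h1]
              have hle := pvGoA_fuel_le map dx dy f [(x + dx, y + dy), (x + dx - 1, y + dy)] (PySem.Set.add v (x, y))
              rw [min_eq_left hle]
              rw [ih _ (by omega) cs rest _]
              simp [pvPass, hr, Bool.and_assoc]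
            · simp only [pvSucc, hr, if_pos (And.intro hc1 hc2), PySem.Set.empty, List.nil_append]
              rw [ih f (by omega) cs rest (PySem.Set.add v (x, y))]
              by_cases hc3 : cell = "#"
              · subst hc3; simp [pvGoA_nil, pvPass, hr]
              · simp [pvGoA_nil, pvPass, hr, hc1, hc2, hc3]

theorem pvFill_nil_all (map : List (List String)) (dx dy : Int) (v : PySem.Set (Int × Int)) :
    ∀ f, (pvFill map dx dy [] v [] f).all (pvPass map dx dy) = true := by
  intro f; cases f <;> simp [pvFill]

-- ===== VERDICT (by name: the statement is the Claim_ definition above) =====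
theorem can_move_in_dir_spec : Claim_equal_can_move_in_dir := by
  intro map robot_x robot_y dx dy visited _ _
  unfold Spec_can_move_in_dir can_move_in_dir can_move_in_dir_alt
  have hbi := pvFill_goA map dx dy (pvFuel map) [(robot_x, robot_y)] [] (pvInitVisited visited)
  rw [List.append_nil] at hbi
  rw [hbi, pvFill_nil_all]
  simp
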